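-- pv_equiv track=rewrite | github.com/youzizzz1028/EduMMBias | src/data_generation/profile.py | generate_attribute_combinations
-- ===== SOURCE A (Python) =====
-- import itertools
-- from typing import Dict, List, Tuple
--
-- def generate_attribute_combinations(attribute_pairs: Dict[str, List[str]]) -> List[Dict[str, str]]:
--     """
--     Generate all possible combinations of attribute values.
--
--     Args:
--         attribute_pairs: Dictionary of attribute names and their possible values
--
--     Returns:
--         List[Dict[str, str]]: List of dictionaries representing each combination
--     """
--     # Get attribute names and their possible values
--     attribute_names = list(attribute_pairs.keys())
--     attribute_values = [attribute_pairs[name] for name in attribute_names]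
--
--     # Generate all combinations
--     combinations = list(itertools.product(*attribute_values))
--
--     # Convert to list of dictionaries
--     result = []
--     for combo in combinations:
--         combination_dict = {}
--         for i, attr_name in enumerate(attribute_names):
--             combination_dict[attr_name] = combo[i]
--         result.append(combination_dict)
--
--     return result
-- ===== SOURCE B (Python) =====
-- def generate_attribute_combinations(attribute_pairs):
--     """
--     Generate all possible combinations of attribute values.
--
--     Builds the list of combination dicts incrementally: start from the single
--     empty combination and extend it one attribute at a time (outer loop over
--     partial combinations, inner loop over the new attribute's values, so the
--     last attribute varies fastest, matching itertools.product's order).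
--     """
--     result = [{}]
--     for attr_name, values in attribute_pairs.items():
--         result = [{**partial, attr_name: value}
--                   for partial in result for value in values]
--     return result
-- ===== Notes on version B (the rewrite author's own statement) =====
-- stated objective: simpler
-- what changed: B drops the itertools.product-then-reindex pipeline and builds the list of combination dicts directly with one incremental fold over the attributes (extend every partial dict by each value of the next attribute).
import Mathlib
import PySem

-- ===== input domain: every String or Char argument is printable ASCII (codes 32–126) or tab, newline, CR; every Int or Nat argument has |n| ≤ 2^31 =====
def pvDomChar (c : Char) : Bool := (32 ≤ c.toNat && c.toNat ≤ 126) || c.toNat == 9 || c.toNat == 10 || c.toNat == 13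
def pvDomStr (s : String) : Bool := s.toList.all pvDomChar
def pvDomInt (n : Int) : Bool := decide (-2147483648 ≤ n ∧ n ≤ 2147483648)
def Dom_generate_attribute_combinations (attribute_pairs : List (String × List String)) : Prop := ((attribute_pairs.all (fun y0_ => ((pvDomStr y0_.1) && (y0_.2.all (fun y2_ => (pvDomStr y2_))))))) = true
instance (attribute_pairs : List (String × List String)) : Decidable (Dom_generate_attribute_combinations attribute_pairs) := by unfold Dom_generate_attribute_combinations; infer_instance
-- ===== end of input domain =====

-- B replaces A's itertools.product-then-reindex pipeline by one incremental fold
-- that extends each partial combination dict with the next attribute's values (simpler, one pass).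


-- ===== PORT A =====
-- itertools.product over a list of pools, transliterated from its documented
-- pure-Python equivalent: result = [[]]; for pool in pools: result = [x+[y] for x in result for y in pool]
def pyProduct (pools : List (List String)) : List (List String) :=
  pools.foldl (fun result pool => result.flatMap (fun x => pool.map (fun y => x ++ [y]))) [[]]

def generate_attribute_combinations (attribute_pairs : List (String × List String)) : List (List (String × String)) :=
  let d := PySem.Dict.mk attribute_pairs
  let attribute_names := d.keys
  -- attribute_pairs[name]: .getD [] is a totality guard, never hit (name comes from d.keys)
  let attribute_values := attribute_names.map (fun name => (d.get? name).getD [])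
  let combinations := pyProduct attribute_values
  combinations.map (fun combo =>
    -- for i, attr_name in enumerate(attribute_names): combination_dict[attr_name] = combo[i]
    -- (.getD "" is a totality guard, never hit: i < len(combo))
    ((PySem.List.enumerate attribute_names).foldl
      (fun cd p => cd.insert p.2 ((PySem.List.pyGet? combo p.1).getD "")) (PySem.Dict.mk [])).items)

-- ===== PORT B =====
def generate_attribute_combinations_alt (attribute_pairs : List (String × List String)) : List (List (String × String)) :=
  (attribute_pairs.foldl
    (fun result p => result.flatMap (fun part => p.2.map (fun v => part.insert p.1 v)))
    [PySem.Dict.mk []]).map PySem.Dict.items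

-- ===== PRECONDITION & SPEC =====
-- Pre_ excludes association lists with duplicate keys: they do not arise from a Python
-- dict argument, and the assoc-list encoding of such an input is ambiguous.
def Pre_generate_attribute_combinations (attribute_pairs : List (String × List String)) : Prop :=
  (attribute_pairs.map Prod.fst).Nodup
instance (attribute_pairs : List (String × List String)) : Decidable (Pre_generate_attribute_combinations attribute_pairs) := by unfold Pre_generate_attribute_combinations; infer_instance

def pvWitness_generate_attribute_combinations : (List (String × List String)) :=
  [("a", ["x", "y"]), ("b", ["u"])]

def Spec_generate_attribute_combinations (attribute_pairs : List (String × List String)) (out : List (List (String × String))) : Prop := out = generate_attribute_combinations_alt attribute_pairs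
instance (attribute_pairs : List (String × List String)) (out : List (List (String × String))) : Decidable (Spec_generate_attribute_combinations attribute_pairs out) := by unfold Spec_generate_attribute_combinations; infer_instance

-- ===== CLAIM (what is proved, stated in full; the proofs are below) =====
def Claim_equal_generate_attribute_combinations : Prop := ∀ (attribute_pairs : List (String × List String)), Dom_generate_attribute_combinations attribute_pairs → Pre_generate_attribute_combinations attribute_pairs → Spec_generate_attribute_combinations attribute_pairs (generate_attribute_combinations attribute_pairs)

-- ===== LEMMAS AND PROOFS =====

-- the common specification both ports are shown to compute:
-- the cartesian product of the value lists, each combination zipped with the key list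
def prodSpec (ap : List (String × List String)) : List (List (String × String)) :=
  (pyProduct (ap.map Prod.snd)).map (fun c => (ap.map Prod.fst).zip c)

theorem pyProduct_concat (ps : List (List String)) (p : List String) :
    pyProduct (ps ++ [p]) = (pyProduct ps).flatMap (fun x => p.map (fun y => x ++ [y])) := by
  simp [pyProduct, List.foldl_append]
theorem length_of_mem_pyProduct (pools : List (List String)) (c : List String)
    (hc : c ∈ pyProduct pools) : c.length = pools.length := by
  induction pools using List.reverseRecOn generalizing c with
  | nil => simp [pyProduct] at hc; simp [hc]
  | append_singleton ps p ih =>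
    rw [pyProduct_concat] at hc
    simp only [List.mem_flatMap, List.mem_map] at hc
    obtain ⟨x, hx, y, _, rfl⟩ := hc
    simp [ih x hx]
theorem lookup_column (ap : List (String × List String))
    (h : (ap.map Prod.fst).Nodup) :
    (ap.map Prod.fst).map (fun name => ((PySem.Dict.mk ap).get? name).getD [])
      = ap.map Prod.snd := by
  induction ap with
  | nil => rfl
  | cons p t ih =>
    simp only [List.map_cons, List.nodup_cons] at h ⊢
    refine List.cons_eq_cons.mpr ⟨?_, ?_⟩
    · simp [PySem.Dict.get?]
    · rw [← ih h.2]
      refine List.map_congr_left ?_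
      intro n hn
      have hne : p.1 ≠ n := fun e => h.1 (e ▸ hn)
      simp [PySem.Dict.get?, List.find?, beq_eq_false_iff_ne.mpr hne]
theorem pyGet?_append_cons (pre : List String) (v : String) (vs : List String) :
    PySem.List.pyGet? (pre ++ v :: vs) (pre.length : Int) = some v := by
  simp [PySem.List.pyGet?, PySem.List.pyIdx?]
theorem conv_aux (ns : List String) (pre post : List String) (d : PySem.Dict String String)
    (hlen : ns.length = post.length) (hd : ∀ n ∈ ns, d.contains n = false) (hnd : ns.Nodup) :
    ((PySem.List.enumerate ns (pre.length : Int)).foldl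
        (fun cd p => cd.insert p.2 ((PySem.List.pyGet? (pre ++ post) p.1).getD "")) d).items
      = d.items ++ ns.zip post := by
  induction ns generalizing pre post d with
  | nil => simp [PySem.List.enumerate]
  | cons n t ih =>
    cases post with
    | nil => simp at hlen
    | cons v vs =>
      simp only [PySem.List.enumerate, List.foldl_cons]
      rw [pyGet?_append_cons]
      have hdn : d.contains n = false := hd n (by simp)
      have hins : (d.insert n v).items = d.items ++ [(n, v)] := by
        simp [PySem.Dict.insert, hdn]
      have hcont : ∀ m ∈ t, (d.insert n v).contains m = false := by
        intro m hm
        have hne : n ≠ m := fun e => (List.nodup_cons.mp hnd).1 (e ▸ hm)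
        simp [PySem.Dict.contains, hins, List.any_append, beq_eq_false_iff_ne.mpr hne]
        have := hd m (by simp [hm])
        simpa [PySem.Dict.contains] using this
      have hlen2 : t.length = vs.length := by simpa using hlen
      have hcast : (pre.length : Int) + 1 = ((pre ++ [v]).length : Int) := by simp
      have hre : pre ++ v :: vs = (pre ++ [v]) ++ vs := by simp
      rw [Option.getD_some, hcast, hre, ih (pre ++ [v]) vs _ hlen2 hcont (List.nodup_cons.mp hnd).2, hins]
      simp

theorem a_eq_spec (ap : List (String × List String))
    (h : (ap.map Prod.fst).Nodup) :
    generate_attribute_combinations ap = prodSpec ap := by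
  unfold generate_attribute_combinations prodSpec
  have hkeys : (PySem.Dict.mk ap).keys = ap.map Prod.fst := by simp [PySem.Dict.keys]
  simp only [hkeys]
  rw [lookup_column ap h]
  refine List.map_congr_left ?_
  intro c hc
  have hlen : (ap.map Prod.fst).length = c.length := by
    rw [length_of_mem_pyProduct _ c hc]; simp
  have := conv_aux (ap.map Prod.fst) [] c (PySem.Dict.mk []) (by simpa using hlen)
      (by intro n _; simp [PySem.Dict.contains]) h
  simpa using this

theorem b_eq_spec (ap : List (String × List String))
    (h : (ap.map Prod.fst).Nodup) :
    generate_attribute_combinations_alt ap = prodSpec ap := by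
  induction ap using List.reverseRecOn with
  | nil => rfl
  | append_singleton t q ih =>
    have h' : ((t.map Prod.fst) ++ [q.1]).Nodup := by simpa using h
    have hnames : (t.map Prod.fst).Nodup := h'.of_append_left
    have hq : q.1 ∉ t.map Prod.fst := by
      have hd := (List.nodup_append.mp h').2.2
      intro hm
      exact hd _ hm q.1 (by simp) rfl
    unfold generate_attribute_combinations_alt at ih ⊢
    rw [List.foldl_append, List.foldl_cons, List.foldl_nil, List.map_flatMap]
    have step : ∀ part ∈ t.foldl
        (fun result p => result.flatMap (fun part => p.2.map (fun v => part.insert p.1 v)))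
        [PySem.Dict.mk []],
        (q.2.map (fun v => part.insert q.1 v)).map PySem.Dict.items
          = q.2.map (fun v => part.items ++ [(q.1, v)]) := by
      intro part hpart
      have hmem : part.items ∈ prodSpec t := by
        rw [← ih hnames]
        exact List.mem_map_of_mem hpart
      obtain ⟨c, hcmem, hce⟩ := by simpa [prodSpec, List.mem_map] using hmem
      have hclen : (t.map Prod.fst).length ≤ c.length := by
        rw [length_of_mem_pyProduct _ c hcmem]; simp
      have hkeys : part.items.map Prod.fst = t.map Prod.fst := by
        rw [← hce, List.map_fst_zip hclen]
      have hcontains : part.contains q.1 = false := by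
        simp only [PySem.Dict.contains, List.any_eq_false]
        intro p hp
        have hmem2 : p.1 ∈ t.map Prod.fst := hkeys ▸ List.mem_map_of_mem hp
        simp only [Bool.not_eq_true]
        exact beq_eq_false_iff_ne.mpr (fun e : p.1 = q.1 => hq (by rwa [e] at hmem2))
      rw [List.map_map]
      refine List.map_congr_left ?_
      intro v _
      simp [PySem.Dict.insert, hcontains]
    have hfm := List.flatMap_map PySem.Dict.items
      (fun pi => q.2.map (fun v => pi ++ [(q.1, v)]))
      (t.foldl (fun result p => result.flatMap (fun part => p.2.map (fun v => part.insert p.1 v)))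
        [PySem.Dict.mk []])
    rw [ih hnames] at hfm
    rw [List.flatMap_congr step, ← hfm]
    simp only [prodSpec, List.map_append, List.map_cons, List.map_nil, pyProduct_concat,
      List.map_flatMap, List.flatMap_map, List.map_map]
    refine List.flatMap_congr ?_
    intro c hcmem
    have hclen : (t.map Prod.fst).length = c.length := by
      rw [length_of_mem_pyProduct _ c hcmem]; simp
    refine List.map_congr_left ?_
    intro v _
    simp [List.zip_append hclen]

-- ===== VERDICT (by name: the statement is the Claim_ definition above) =====
theorem generate_attribute_combinations_spec : Claim_equal_generate_attribute_combinations := by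
  intro ap _ hpre
  unfold Spec_generate_attribute_combinations
  rw [a_eq_spec ap hpre, b_eq_spec ap hpre]
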